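-- pv_equiv track=rewrite | github.com/hhg21011998/reviews_ossu | intro_to_CS_program_python_OSSU-main/ps3/ps3.py | update_hand
-- ===== SOURCE A (Python) =====
-- def update_hand(hand, word):
--     """
--     Does NOT assume that hand contains every letter in word at least as
--     many times as the letter appears in word. Letters in word that don't
--     appear in hand should be ignored. Letters that appear in word more times
--     than in hand should never result in a negative count; instead, set the
--     count in the returned hand to 0 (or remove the letter from the
--     dictionary, depending on how your code is structured).
--
--     Updates the hand: uses up the letters in the given word
--     and returns the new hand, without those letters in it.
--
--     Has no side effects: does not modify hand.
--
--     word: string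
--     hand: dictionary (string -> int)
--     returns: dictionary (string -> int)
--     """
--     word = word.lower()
--     hand_2 = hand.copy()
--
--     for letter in word:
--         hand_2[letter] = hand_2.get(letter, 0) - 1
--         if hand_2[letter] <= 0:
--             del hand_2[letter]
--
--     return hand_2
-- ===== SOURCE B (Python) =====
-- def update_hand(hand, word):
--     used = {}
--     for ch in word.lower():
--         used[ch] = used.get(ch, 0) + 1
--     out = {}
--     for letter, n in hand.items():
--         c = used.get(letter, 0)
--         if c == 0:
--             out[letter] = n
--         elif n - c > 0:
--             out[letter] = n - c
--     return out
-- ===== Notes on version B (the rewrite author's own statement) =====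
-- stated objective: idiomatic
-- what changed: A walks the word letter by letter, decrementing and deleting hand entries as it goes; B builds a letter-count dictionary of the lowered word once and then makes a single pass over the hand, copying untouched entries verbatim and keeping a decremented count only when it stays positive.
import Mathlib
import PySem

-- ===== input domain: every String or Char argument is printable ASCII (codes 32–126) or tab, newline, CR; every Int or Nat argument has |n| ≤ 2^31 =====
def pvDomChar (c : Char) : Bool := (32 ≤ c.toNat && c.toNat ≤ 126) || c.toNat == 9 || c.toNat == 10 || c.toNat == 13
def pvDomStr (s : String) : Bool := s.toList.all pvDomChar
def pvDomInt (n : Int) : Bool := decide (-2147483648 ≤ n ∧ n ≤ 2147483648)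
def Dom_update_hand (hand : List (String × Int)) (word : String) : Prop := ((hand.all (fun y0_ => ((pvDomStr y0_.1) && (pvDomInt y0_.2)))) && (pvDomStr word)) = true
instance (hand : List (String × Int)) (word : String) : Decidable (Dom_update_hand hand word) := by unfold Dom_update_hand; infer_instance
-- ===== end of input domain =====

-- B replaces A's per-letter decrement-and-delete loop over the word by a word letter-count
-- dictionary plus one pass over the hand (objective: alternative/idiomatic single pass over hand).

-- ===== PORT A =====
def update_hand (hand : List (String × Int)) (word : String) : List (String × Int) :=
  let w := PySem.Str.lower word
  let hand2 := PySem.Dict.ofList hand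
  (w.toList.foldl
    (fun (d : PySem.Dict String Int) letter =>
      let k := String.mk [letter]
      let d' := d.insert k (d.getD k 0 - 1)
      if d'.getD k 0 ≤ 0 then d'.erase k else d') hand2).items

-- ===== PORT B =====
def update_hand_alt (hand : List (String × Int)) (word : String) : List (String × Int) :=
  let used := (PySem.Str.lower word).toList.foldl
    (fun (d : PySem.Dict String Int) ch =>
      d.insert (String.mk [ch]) (d.getD (String.mk [ch]) 0 + 1)) PySem.Dict.empty
  let out := (PySem.Dict.ofList hand).items.foldl
    (fun (o : PySem.Dict String Int) p =>
      let c := used.getD p.1 0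
      if c = 0 then o.insert p.1 p.2
      else if p.2 - c > 0 then o.insert p.1 (p.2 - c) else o) PySem.Dict.empty
  out.items

-- ===== PRECONDITION & SPEC =====
def Spec_update_hand (hand : List (String × Int)) (word : String) (out : List (String × Int)) : Prop := out = update_hand_alt hand word
instance (hand : List (String × Int)) (word : String) (out : List (String × Int)) : Decidable (Spec_update_hand hand word out) := by unfold Spec_update_hand; infer_instance

-- ===== CLAIM (what is proved, stated in full; the proofs are below) =====
def Claim_equal_update_hand : Prop := ∀ (hand : List (String × Int)) (word : String), Dom_update_hand hand word → Spec_update_hand hand word (update_hand hand word)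

-- ===== LEMMAS AND PROOFS =====

-- the common result of both programs on one hand entry, for a given per-key count c
def pvSel (c : String → Int) (p : String × Int) : Option (String × Int) :=
  if c p.1 = 0 then some p else if p.2 - c p.1 > 0 then some (p.1, p.2 - c p.1) else none

-- A's loop body on one key
def pvStepA (d : PySem.Dict String Int) (k : String) : PySem.Dict String Int :=
  let d' := d.insert k (d.getD k 0 - 1)
  if d'.getD k 0 ≤ 0 then d'.erase k else d'

-- effect of one A-step on the items list
def pvG (x : String) (p : String × Int) : Option (String × Int) :=
  if p.1 = x then (if p.2 - 1 ≤ 0 then none else some (x, p.2 - 1)) else some p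

theorem pvG_fst (x : String) (p q : String × Int) (h : pvG x p = some q) : q.1 = p.1 := by
  unfold pvG at h
  by_cases hx : p.1 = x
  · rw [if_pos hx] at h
    by_cases h1 : p.2 - 1 ≤ 0
    · simp [h1] at h
    · rw [if_neg h1] at h
      cases h
      simp [hx]
  · rw [if_neg hx] at h
    cases h
    rfl

theorem pvG_keys_sublist (x : String) (l : List (String × Int)) :
    ((l.filterMap (pvG x)).map Prod.fst).Sublist (l.map Prod.fst) := by
  induction l with
  | nil => simp
  | cons p l ih =>
    cases hq : pvG x p with
    | none =>
      simp only [List.filterMap_cons, hq, List.map_cons]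
      exact ih.cons _
    | some q =>
      simp only [List.filterMap_cons, hq, List.map_cons]
      rw [pvG_fst x p q hq]
      exact ih.cons₂ _

theorem pvFilterMap_eq_self (x : String) (l : List (String × Int))
    (hno : ∀ p ∈ l, p.1 ≠ x) : l.filterMap (pvG x) = l := by
  induction l with
  | nil => rfl
  | cons p l ih =>
    have h : pvG x p = some p := by simp [pvG, hno p (List.mem_cons_self ..)]
    rw [List.filterMap_cons, h, ih (fun q hq => hno q (List.mem_cons_of_mem _ hq))]

theorem pvAux1 (x : String) (v : Int) (hle : v - 1 ≤ 0) (l : List (String × Int))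
    (hmem : ∀ p ∈ l, p.1 = x → p.2 = v) :
    (l.map (fun p => if p.1 == x then (x, v - 1) else p)).filter (fun p => !(p.1 == x))
      = l.filterMap (pvG x) := by
  induction l with
  | nil => rfl
  | cons p l ih =>
    have ih' := ih (fun q hq h => hmem q (List.mem_cons_of_mem _ hq) h)
    by_cases hx : p.1 = x
    · have hv : p.2 = v := hmem p (List.mem_cons_self ..) hx
      have hg : pvG x p = none := by simp [pvG, hx, hv, hle]
      simp only [List.map_cons, List.filterMap_cons, hg, if_pos (beq_iff_eq.mpr hx)]
      rw [List.filter_cons_of_neg (by simp)]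
      exact ih'
    · have hg : pvG x p = some p := by simp [pvG, hx]
      rw [List.map_cons, if_neg (show ¬ (p.1 == x) = true by simpa using hx),
          List.filter_cons_of_pos (by simpa using hx), List.filterMap_cons, hg, ih']

theorem pvAux2 (x : String) (v : Int) (hgt : ¬ v - 1 ≤ 0) (l : List (String × Int))
    (hmem : ∀ p ∈ l, p.1 = x → p.2 = v) :
    l.map (fun p => if p.1 == x then (x, v - 1) else p) = l.filterMap (pvG x) := by
  induction l with
  | nil => rfl
  | cons p l ih =>
    have ih' := ih (fun q hq h => hmem q (List.mem_cons_of_mem _ hq) h)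
    by_cases hx : p.1 = x
    · have hv : p.2 = v := hmem p (List.mem_cons_self ..) hx
      have hg : pvG x p = some (x, v - 1) := by simp [pvG, hx, hv, hgt]
      simp only [List.map_cons, List.filterMap_cons, hg, if_pos (beq_iff_eq.mpr hx)]
      rw [ih']
    · have hg : pvG x p = some p := by simp [pvG, hx]
      rw [List.map_cons, if_neg (show ¬ (p.1 == x) = true by simpa using hx),
          List.filterMap_cons, hg, ih']

theorem pvStepA_items (d : PySem.Dict String Int) (x : String) (hnd : d.keys.Nodup) :
    (pvStepA d x).items = d.items.filterMap (pvG x) := by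
  unfold pvStepA
  dsimp only
  by_cases hcon : d.contains x
  · have hv : d.get? x = some (d.getD x 0) := by
      have hsome : (d.get? x).isSome := by
        rw [← PySem.Dict.contains_eq_isSome_get?]
        exact hcon
      rcases Option.isSome_iff_exists.mp hsome with ⟨v, hv⟩
      rw [hv, PySem.Dict.getD_of_get?_eq_some d 0 hv]
    have hmem : ∀ p ∈ d.items, p.1 = x → p.2 = d.getD x 0 := by
      intro p hp hx
      have hm : (x, p.2) ∈ d.items := by
        rcases p with ⟨k, n⟩
        cases hx
        exact hp
      have := PySem.Dict.get?_of_mem_items d hm hnd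
      rw [hv] at this
      exact (Option.some.inj this).symm
    rw [PySem.Dict.getD_insert_self]
    by_cases hle : d.getD x 0 - 1 ≤ 0
    · rw [if_pos hle]
      show ((d.insert x (d.getD x 0 - 1)).items.filter fun p => !(p.1 == x)) = _
      rw [PySem.Dict.items_insert_of_contains d _ hcon]
      exact pvAux1 x (d.getD x 0) hle d.items hmem
    · rw [if_neg hle, PySem.Dict.items_insert_of_contains d _ hcon]
      exact pvAux2 x (d.getD x 0) hle d.items hmem
  · have hcon' : d.contains x = false := by simpa using hcon
    have hno : ∀ p ∈ d.items, p.1 ≠ x := by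
      intro p hp h
      apply hcon
      unfold PySem.Dict.contains
      exact List.any_eq_true.mpr ⟨p, hp, beq_iff_eq.mpr h⟩
    have hgd : d.getD x 0 = 0 := PySem.Dict.getD_of_not_contains d 0 hcon'
    rw [PySem.Dict.getD_insert_self, hgd, if_pos (by norm_num)]
    show ((d.insert x (0 - 1)).items.filter fun p => !(p.1 == x)) = _
    rw [PySem.Dict.items_insert_of_not_contains d _ hcon', List.filter_append,
        List.filter_cons_of_neg (by simp), List.filter_nil, List.append_nil,
        List.filter_eq_self.mpr (fun p hp => by simpa using hno p hp),
        pvFilterMap_eq_self x d.items hno]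

theorem pvStepA_nodup (d : PySem.Dict String Int) (x : String) (hnd : d.keys.Nodup) :
    (pvStepA d x).keys.Nodup := by
  have h : (pvStepA d x).keys = (pvStepA d x).items.map Prod.fst := rfl
  rw [h, pvStepA_items d x hnd]
  exact (pvG_keys_sublist x d.items).nodup (by simpa [PySem.Dict.keys] using hnd)

theorem pvG_bind (x : String) (L : List String) (p : String × Int) :
    (pvG x p).bind (pvSel (fun k => (L.count k : Int)))
      = pvSel (fun k => (((x :: L).count k : Nat) : Int)) p := by
  rcases p with ⟨k, n⟩
  by_cases hx : k = x
  · subst hx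
    have hcc : List.count k (k :: L) = List.count k L + 1 := List.count_cons_self ..
    by_cases h1 : n - 1 ≤ 0
    · have hg : pvG k (k, n) = none := by simp [pvG, h1]
      rw [hg]
      simp only [Option.bind]
      unfold pvSel
      dsimp only
      simp only [hcc]
      push_cast
      split_ifs <;> first
        | rfl
        | (exfalso; omega)
    · have hg : pvG k (k, n) = some (k, n - 1) := by simp [pvG, h1]
      rw [hg]
      simp only [Option.bind]
      unfold pvSel
      dsimp only
      simp only [hcc]
      push_cast
      split_ifs <;> first
        | rfl
        | (exfalso; omega)
        | (simp only [Option.some.injEq, Prod.mk.injEq]; exact ⟨trivial, by omega⟩)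
  · have hg : pvG x (k, n) = some (k, n) := by simp [pvG, hx]
    rw [hg]
    simp only [Option.bind]
    unfold pvSel
    dsimp only
    simp only [show List.count k (x :: L) = List.count k L from List.count_cons_of_ne (Ne.symm hx) ..]

theorem pvAloop (L : List String) (d : PySem.Dict String Int) (hnd : d.keys.Nodup) :
    (L.foldl pvStepA d).items = d.items.filterMap (pvSel (fun k => (L.count k : Int))) := by
  induction L generalizing d with
  | nil => simp [pvSel]
  | cons x L ih =>
    rw [List.foldl_cons, ih _ (pvStepA_nodup d x hnd), pvStepA_items d x hnd,
        List.filterMap_filterMap]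
    exact List.filterMap_congr (fun p _ => pvG_bind x L p)

theorem pvBloop (used : PySem.Dict String Int) (l : List (String × Int)) (o : PySem.Dict String Int)
    (hnd : (l.map Prod.fst).Nodup) (hfresh : ∀ p ∈ l, o.contains p.1 = false) :
    (l.foldl (fun (o : PySem.Dict String Int) p =>
        let c := used.getD p.1 0
        if c = 0 then o.insert p.1 p.2
        else if p.2 - c > 0 then o.insert p.1 (p.2 - c) else o) o).items
      = o.items ++ l.filterMap (pvSel (fun k => used.getD k 0)) := by
  induction l generalizing o with
  | nil => simp
  | cons p l ih =>
    have hp1 : p.1 ∉ l.map Prod.fst := (List.nodup_cons.mp (by simpa using hnd)).1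
    have hnd' : (l.map Prod.fst).Nodup := (List.nodup_cons.mp (by simpa using hnd)).2
    have hfp : o.contains p.1 = false := hfresh p (List.mem_cons_self ..)
    have hne : ∀ q ∈ l, q.1 ≠ p.1 := fun q hq h => hp1 (h ▸ List.mem_map_of_mem hq)
    have hins : ∀ v : Int, (o.insert p.1 v).items = o.items ++ [(p.1, v)] :=
      fun v => PySem.Dict.items_insert_of_not_contains _ _ hfp
    have hfresh' : ∀ v : Int, ∀ q ∈ l, ((o.insert p.1 v).contains q.1) = false := by
      intro v q hq
      rw [PySem.Dict.contains_insert]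
      simp [hne q hq, hfresh q (List.mem_cons_of_mem _ hq)]
    simp only [List.foldl_cons]
    by_cases hc : used.getD p.1 0 = 0
    · rw [if_pos hc, ih _ hnd' (hfresh' _), hins]
      simp [pvSel, hc]
    · by_cases hgt : p.2 - used.getD p.1 0 > 0
      · rw [if_neg hc, if_pos hgt, ih _ hnd' (hfresh' _), hins]
        simp [pvSel, hc, sub_pos.mp hgt]
      · rw [if_neg hc, if_neg hgt,
          ih _ hnd' (fun q hq => hfresh q (List.mem_cons_of_mem _ hq))]
        simp only [pvSel, List.filterMap_cons, if_neg hc]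
        rw [if_neg (by omega)]

-- ===== VERDICT (by name: the statement is the Claim_ definition above) =====
theorem update_hand_spec : Claim_equal_update_hand := by
  intro hand word _
  show update_hand hand word = update_hand_alt hand word
  unfold update_hand update_hand_alt
  dsimp only
  set chars := (PySem.Str.lower word).toList with hchars
  set L := chars.map (fun ch => String.mk [ch]) with hL
  set h2 := PySem.Dict.ofList hand with hh2
  set used := chars.foldl
    (fun (d : PySem.Dict String Int) ch =>
      d.insert (String.mk [ch]) (d.getD (String.mk [ch]) 0 + 1)) PySem.Dict.empty with hU
  have hA : chars.foldl
      (fun (d : PySem.Dict String Int) letter =>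
        let k := String.mk [letter]
        let d' := d.insert k (d.getD k 0 - 1)
        if d'.getD k 0 ≤ 0 then d'.erase k else d') h2
      = L.foldl pvStepA h2 := by
    rw [hL, List.foldl_map]
    rfl
  have hU' : used = L.foldl
      (fun (d : PySem.Dict String Int) x => d.insert x (d.getD x 0 + 1)) PySem.Dict.empty := by
    rw [hU, hL, List.foldl_map]
  have hcount : ∀ k : String, used.getD k 0 = ((L.count k : Nat) : Int) := by
    intro k
    rw [hU', PySem.Dict.getD_foldl_insert_add_one]
    simp [PySem.Dict.getD_empty]
  rw [hA, pvAloop _ _ (PySem.Dict.nodup_keys_ofList hand),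
      pvBloop used h2.items PySem.Dict.empty (PySem.Dict.nodup_keys_ofList hand)
        (fun p _ => PySem.Dict.contains_empty _)]
  have hsel : ∀ p ∈ h2.items, pvSel (fun k => ((L.count k : Nat) : Int)) p
      = pvSel (fun k => used.getD k 0) p := by
    intro p _
    simp only [pvSel, hcount]
  rw [List.filterMap_congr hsel]
  simp [PySem.Dict.empty]
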